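-- pv_equiv track=rewrite | github.com/NicolasBizzozzero/Competitive-Programming | Contests/2019-02-28 - Google HashCode 2019/src/main.py | _baseline_algo
-- ===== SOURCE A (Python) =====
-- def _baseline_algo(pictures):
-- 	output  = []
-- 	i_picture = 0
-- 	while pictures.get(i_picture, False):
-- 		if pictures[i_picture]["orientation"] == "H":
-- 			output.append((i_picture,))
-- 			i_picture += 1
-- 		elif pictures[i_picture]["orientation"] == "V" and \
-- 		     pictures.get(i_picture + 1) and \
-- 		     pictures[i_picture + 1]["orientation"] == "V":
-- 			output.append((i_picture, i_picture + 1))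
-- 			i_picture += 2
-- 		else:
-- 			# output.append((i_picture,))
-- 			i_picture += 1
-- 	return output
-- ===== SOURCE B (Python) =====
-- def _baseline_algo(pictures):
--     # phase 1: collect the orientations of the contiguous prefix of truthy entries
--     orientations = []
--     i = 0
--     while pictures.get(i, False):
--         orientations.append(pictures[i]["orientation"])
--         i += 1
--     # phase 2: group into slides, carrying a pending unpaired vertical picture
--     output = []
--     pending_v = None
--     for j, orientation in enumerate(orientations):
--         if orientation == "H":
--             output.append((j,))
--             pending_v = None
--         elif orientation == "V":
--             if pending_v is None:
--                 pending_v = j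
--             else:
--                 output.append((pending_v, j))
--                 pending_v = None
--         else:
--             pending_v = None
--     return output
-- ===== Notes on version B (the rewrite author's own statement) =====
-- stated objective: alternative
-- what changed: A's single while loop with 1-or-2 index steps and a look-ahead at i+1 is replaced by two phases: first extract the orientation strings of the contiguous truthy prefix, then one pending-vertical fold over them that pairs verticals without any look-ahead.
import Mathlib
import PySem

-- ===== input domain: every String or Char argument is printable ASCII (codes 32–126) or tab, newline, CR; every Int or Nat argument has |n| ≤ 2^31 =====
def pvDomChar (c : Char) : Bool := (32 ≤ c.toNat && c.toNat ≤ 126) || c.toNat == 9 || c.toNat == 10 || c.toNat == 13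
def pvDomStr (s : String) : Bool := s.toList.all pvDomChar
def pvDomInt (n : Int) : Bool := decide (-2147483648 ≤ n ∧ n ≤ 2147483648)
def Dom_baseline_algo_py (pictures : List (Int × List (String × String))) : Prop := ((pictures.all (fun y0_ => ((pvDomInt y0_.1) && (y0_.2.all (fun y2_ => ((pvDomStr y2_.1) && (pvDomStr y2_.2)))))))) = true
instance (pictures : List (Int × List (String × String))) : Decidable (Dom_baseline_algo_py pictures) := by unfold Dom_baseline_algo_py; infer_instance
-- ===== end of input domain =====

-- B replaces A's step-by-1-or-2 look-ahead loop by two phases (extract the prefix of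
-- orientations, then a single pending-vertical fold); objective: alternative decomposition.

-- `pictures.get(i, False)` is truthy: key present with a nonempty dict value (first match).
def pvTruthy (pictures : List (Int × List (String × String))) (i : Int) : Bool :=
  match pictures.lookup i with
  | some d => decide (d ≠ [])
  | none => false

-- `pictures[i]["orientation"]` as an Option (none = KeyError, excluded by Pre_).
def pvOrient (pictures : List (Int × List (String × String))) (i : Int) : Option String :=
  ((pictures.lookup i).getD []).lookup "orientation"

-- ===== PORT A =====
-- A's while loop; fuel (pictures.length + 1) is an upper bound on the number of
-- iterations (prefix of present distinct keys ≤ length), proved below, so it never runs out.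
def pvAGo (pictures : List (Int × List (String × String))) :
    Nat → Int → List (List Int) → List (List Int)
  | 0, _, out => out
  | fuel+1, i, out =>
    if pvTruthy pictures i then
      if pvOrient pictures i = some "H" then
        pvAGo pictures fuel (i+1) (out ++ [[i]])
      else if pvOrient pictures i = some "V" ∧ pvTruthy pictures (i+1) = true ∧
              pvOrient pictures (i+1) = some "V" then
        pvAGo pictures fuel (i+2) (out ++ [[i, i+1]])
      else
        pvAGo pictures fuel (i+1) out
    else out

def baseline_algo_py (pictures : List (Int × List (String × String))) : List (List Int) :=
  pvAGo pictures (pictures.length + 1) 0 []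

-- ===== PORT B =====
-- phase 1 of Source B: orientations of the contiguous truthy prefix
-- (`pictures[i]["orientation"]` ported as getD ""; exact under Pre_, which excludes KeyError).
def pvOris (pictures : List (Int × List (String × String))) : Nat → Int → List String
  | 0, _ => []
  | fuel+1, i =>
    if pvTruthy pictures i then
      ((pvOrient pictures i).getD "") :: pvOris pictures fuel (i+1)
    else []

-- phase 2 of Source B: one step of the pending-vertical fold
def pvStep (st : List (List Int) × Option Int) (p : Int × String) :
    List (List Int) × Option Int :=
  if p.2 = "H" then (st.1 ++ [[p.1]], none)
  else if p.2 = "V" then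
    match st.2 with
    | none => (st.1, some p.1)
    | some pv => (st.1 ++ [[pv, p.1]], none)
  else (st.1, none)

def baseline_algo_py_alt (pictures : List (Int × List (String × String))) : List (List Int) :=
  ((PySem.List.enumerate (pvOris pictures (pictures.length + 1) 0) 0).foldl
      pvStep ([], none)).1

-- ===== PRECONDITION & SPEC =====
-- Pre_ excludes exactly the inputs on which Python A raises KeyError: some picture in the
-- contiguous truthy prefix starting at index 0 lacks the "orientation" key.
def Pre_baseline_algo_py (pictures : List (Int × List (String × String))) : Prop :=
  ∀ k : Nat, k < pictures.length →
    (∀ j : Nat, j ≤ k → pvTruthy pictures (j : Int) = true) →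
    (pvOrient pictures (k : Int)).isSome = true
instance (pictures : List (Int × List (String × String))) : Decidable (Pre_baseline_algo_py pictures) := by unfold Pre_baseline_algo_py; infer_instance

def pvWitness_baseline_algo_py : (List (Int × List (String × String))) :=
  [(0, [("orientation", "V")]), (1, [("orientation", "V")]), (2, [("orientation", "H")])]

def Spec_baseline_algo_py (pictures : List (Int × List (String × String))) (out : List (List Int)) : Prop := out = baseline_algo_py_alt pictures
instance (pictures : List (Int × List (String × String))) (out : List (List Int)) : Decidable (Spec_baseline_algo_py pictures out) := by unfold Spec_baseline_algo_py; infer_instance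

-- ===== CLAIM (what is proved, stated in full; the proofs are below) =====
def Claim_equal_baseline_algo_py : Prop := ∀ (pictures : List (Int × List (String × String))), Dom_baseline_algo_py pictures → Pre_baseline_algo_py pictures → Spec_baseline_algo_py pictures (baseline_algo_py pictures)

-- ===== LEMMAS AND PROOFS =====

-- canonical grouping function both ports are reduced to
def pvG : List String → Int → Option Int → List (List Int)
  | [], _, _ => []
  | o :: t, s, pend =>
    if o = "H" then [s] :: pvG t (s+1) none
    else if o = "V" then
      match pend with
      | none => pvG t (s+1) (some s)
      | some p => [p, s] :: pvG t (s+1) none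
    else pvG t (s+1) none

-- one-step unfolding equations (definitional)
lemma pvAGo_succ (pictures : List (Int × List (String × String))) (f : Nat) (i : Int)
    (out : List (List Int)) :
    pvAGo pictures (f+1) i out =
      (if pvTruthy pictures i then
        (if pvOrient pictures i = some "H" then
          pvAGo pictures f (i+1) (out ++ [[i]])
        else if pvOrient pictures i = some "V" ∧ pvTruthy pictures (i+1) = true ∧
                pvOrient pictures (i+1) = some "V" then
          pvAGo pictures f (i+2) (out ++ [[i, i+1]])
        else pvAGo pictures f (i+1) out)
      else out) := rfl

lemma pvOris_succ (pictures : List (Int × List (String × String))) (f : Nat) (i : Int) :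
    pvOris pictures (f+1) i =
      (if pvTruthy pictures i then
        ((pvOrient pictures i).getD "") :: pvOris pictures f (i+1)
      else []) := rfl

lemma pvG_cons (o : String) (t : List String) (s : Int) (pend : Option Int) :
    pvG (o :: t) s pend =
      (if o = "H" then [s] :: pvG t (s+1) none
      else if o = "V" then
        match pend with
        | none => pvG t (s+1) (some s)
        | some p => [p, s] :: pvG t (s+1) none
      else pvG t (s+1) none) := rfl

lemma pvG_drop (t : List String) (s : Int) (p : Int) (o : String) (h : o ≠ "V") :
    pvG (o :: t) s (some p) = pvG (o :: t) s none := by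
  by_cases hH : o = "H" <;> simp [pvG_cons, hH, h]

-- the orientation string seen by B ("" on a KeyError input)
lemma pvOrient_getD_ne {pictures : List (Int × List (String × String))} {i : Int} (x : String)
    (h : pvOrient pictures i ≠ some x) (hx : x ≠ "") : (pvOrient pictures i).getD "" ≠ x := by
  rcases ho : pvOrient pictures i with _ | y
  · simpa using Ne.symm hx
  · rw [ho] at h; simpa using fun hc => h (by rw [hc])

lemma pvG_VV (r : List String) (s : Int) :
    pvG ("V" :: "V" :: r) s none = [s, s+1] :: pvG r (s+1+1) none := by
  simp [pvG_cons]

-- B's fold equals pvG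
lemma pvB_eq (l : List String) : ∀ (s : Int) (out : List (List Int)) (pend : Option Int),
    ((PySem.List.enumerate l s).foldl pvStep (out, pend)).1 = out ++ pvG l s pend := by
  induction l with
  | nil => intro s out pend; simp [PySem.List.enumerate_nil, pvG]
  | cons o t ih =>
    intro s out pend
    rw [PySem.List.enumerate_cons, List.foldl_cons]
    by_cases hH : o = "H"
    · simp [pvStep, pvG_cons, hH, ih]
    · by_cases hV : o = "V"
      · cases pend <;> simp [pvStep, pvG_cons, hV, ih]
      · simp [pvStep, pvG_cons, hH, hV, ih]

-- fuel stabilization: once the loop stops before the fuel is exhausted, more fuel changes nothing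
lemma pvOris_stable (pictures : List (Int × List (String × String))) :
    ∀ (f : Nat) (i : Int), (pvOris pictures f i).length < f →
      pvOris pictures (f+1) i = pvOris pictures f i := by
  intro f
  induction f with
  | zero => intro i h; simp at h
  | succ f ih =>
    intro i h
    by_cases ht : pvTruthy pictures i = true
    · rw [pvOris_succ pictures f i, if_pos ht] at h
      simp only [List.length_cons] at h
      rw [pvOris_succ pictures (f+1) i, if_pos ht, pvOris_succ pictures f i, if_pos ht,
        ih (i+1) (by omega)]
    · rw [pvOris_succ pictures (f+1) i, if_neg ht, pvOris_succ pictures f i, if_neg ht]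

-- A's loop equals pvG on the orientation prefix, provided the fuel does not run out
lemma pvA_eq (pictures : List (Int × List (String × String))) :
    ∀ (fuel : Nat) (i : Int) (out : List (List Int)),
      (pvOris pictures fuel i).length < fuel →
      pvAGo pictures fuel i out = out ++ pvG (pvOris pictures fuel i) i none := by
  intro fuel
  induction fuel with
  | zero => intro i out h; simp at h
  | succ f ih =>
    intro i out h
    by_cases ht : pvTruthy pictures i = true
    case neg =>
      rw [pvAGo_succ, if_neg ht, pvOris_succ, if_neg ht]
      simp [pvG]
    rw [pvOris_succ, if_pos ht] at h ⊢
    simp only [List.length_cons] at h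
    have hrest : (pvOris pictures f (i+1)).length < f := by omega
    rw [pvAGo_succ, if_pos ht]
    by_cases hH : pvOrient pictures i = some "H"
    · -- horizontal picture
      have hg : (pvOrient pictures i).getD "" = "H" := by rw [hH]; rfl
      rw [if_pos hH, hg, pvG_cons, if_pos rfl, ih (i+1) _ hrest]
      simp
    rw [if_neg hH]
    by_cases hV : pvOrient pictures i = some "V"
    · have hg : (pvOrient pictures i).getD "" = "V" := by rw [hV]; rfl
      rw [hg]
      by_cases hla : pvTruthy pictures (i+1) = true ∧ pvOrient pictures (i+1) = some "V"
      · -- a pair of verticals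
        obtain ⟨hla1, hla2⟩ := hla
        rw [if_pos ⟨hV, hla1, hla2⟩]
        obtain ⟨f', rfl⟩ : ∃ f', f = f' + 1 := by
          cases f with
          | zero => simp [pvOris] at hrest
          | succ f' => exact ⟨f', rfl⟩
        have hV2 : pvOris pictures (f'+1) (i+1) = "V" :: pvOris pictures f' (i+1+1) := by
          rw [pvOris_succ, if_pos hla1, hla2]; rfl
        rw [hV2] at hrest ⊢
        simp only [List.length_cons] at hrest
        have hst := pvOris_stable pictures f' (i+1+1) (by omega)
        have h2 : i + 1 + 1 = i + 2 := by ring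
        rw [pvG_VV, h2,
          ih (i+2) (out ++ [[i, i+1]]) (by rw [← h2, hst]; omega)]
        rw [← h2, hst]
        simp
      · -- vertical without a vertical successor: Python skips it
        have hcond : ¬(pvOrient pictures i = some "V" ∧ pvTruthy pictures (i+1) = true ∧
            pvOrient pictures (i+1) = some "V") := by
          intro hc; exact hla ⟨hc.2.1, hc.2.2⟩
        rw [if_neg hcond, ih (i+1) out hrest, pvG_cons,
          if_neg (by decide : ¬ ("V" = "H")), if_pos rfl]
        -- analyse the next orientation: pending i is dropped either way
        rcases hrec : pvOris pictures f (i+1) with _ | ⟨o2, t⟩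
        · simp [pvG]
        · obtain ⟨f', rfl⟩ : ∃ f', f = f' + 1 := by
            cases f with
            | zero => simp [pvOris] at hrec
            | succ f' => exact ⟨f', rfl⟩
          have ht2 : pvTruthy pictures (i+1) = true := by
            by_contra hc
            rw [pvOris_succ, if_neg hc] at hrec
            simp at hrec
          have ho2 : o2 ≠ "V" := by
            rw [pvOris_succ, if_pos ht2] at hrec
            injection hrec with h1 h2
            rw [← h1]
            exact pvOrient_getD_ne "V" (fun hc => hla ⟨ht2, hc⟩) (by decide)
          rw [pvG_drop t (i+1) i o2 ho2]
    · -- unknown orientation: skipped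
      have hcond : ¬(pvOrient pictures i = some "V" ∧ pvTruthy pictures (i+1) = true ∧
          pvOrient pictures (i+1) = some "V") := by
        intro hc; exact hV hc.1
      rw [if_neg hcond, pvG_cons,
        if_neg (pvOrient_getD_ne "H" hH (by decide)),
        if_neg (pvOrient_getD_ne "V" hV (by decide))]
      exact ih (i+1) out hrest

-- every index the prefix reaches is a present key
lemma pvOris_present (pictures : List (Int × List (String × String))) :
    ∀ (f : Nat) (i : Int) (t : Nat), t < (pvOris pictures f i).length →
      (pictures.lookup (i + (t : Int))).isSome = true := by
  intro f
  induction f with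
  | zero => intro i t h; simp [pvOris] at h
  | succ f ih =>
    intro i t h
    by_cases ht : pvTruthy pictures i = true
    · cases t with
      | zero =>
        simp only [pvTruthy] at ht
        rcases hl : pictures.lookup i with _ | d
        · rw [hl] at ht; simp at ht
        · simp [hl]
      | succ t =>
        simp only [pvOris, ht, if_true, List.length_cons] at h
        have := ih (i+1) t (by omega)
        have harith : i + 1 + (t : Int) = i + ((t : Nat) + 1 : Nat) := by push_cast; ring
        rwa [harith] at this
    · simp [pvOris, ht] at h

-- a present key occurs in the key list
lemma lookup_isSome_mem {α β : Type} [BEq α] [LawfulBEq α]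
    (l : List (α × β)) (k : α) (h : (l.lookup k).isSome = true) :
    k ∈ l.map Prod.fst := by
  induction l with
  | nil => simp [List.lookup] at h
  | cons p t ih =>
    simp only [List.lookup] at h
    rcases hk : (k == p.1) with _ | _
    · rw [hk] at h
      simp only [List.map_cons, List.mem_cons]
      exact Or.inr (ih h)
    · simp [eq_of_beq hk]

-- a nodup list contained in another is no longer than it
lemma nodup_subset_length_le (l l' : List Int) (h : l.Nodup) (hs : l ⊆ l') :
    l.length ≤ l'.length := by
  have h1 : l.toFinset.card = l.length := List.toFinset_card_of_nodup h
  have h2 : l.toFinset ⊆ l'.toFinset := by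
    intro x hx; simp only [List.mem_toFinset] at hx ⊢; exact hs hx
  have h3 := Finset.card_le_card h2
  have h4 := l'.toFinset_card_le
  omega

-- the truthy prefix is no longer than the dictionary itself
lemma pvOris_length_le (pictures : List (Int × List (String × String))) (f : Nat) (i : Int) :
    (pvOris pictures f i).length ≤ pictures.length := by
  set m := (pvOris pictures f i).length with hm
  have hsub : ((List.range m).map (fun t : Nat => i + (t : Int))) ⊆ pictures.map Prod.fst := by
    intro x hx
    simp only [List.mem_map, List.mem_range] at hx
    obtain ⟨t, htm, rfl⟩ := hx
    exact lookup_isSome_mem _ _ (pvOris_present pictures f i t (by omega))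
  have hnd : ((List.range m).map (fun t : Nat => i + (t : Int))).Nodup := by
    refine List.Nodup.map ?_ List.nodup_range
    intro a b hab
    simp only [add_right_inj, Nat.cast_inj] at hab
    exact hab
  have hle := nodup_subset_length_le _ _ hnd hsub
  simpa using hle

-- ===== VERDICT (by name: the statement is the Claim_ definition above) =====
theorem baseline_algo_py_spec : Claim_equal_baseline_algo_py := by
  intro pictures _ _
  unfold Spec_baseline_algo_py baseline_algo_py baseline_algo_py_alt
  have hlen : (pvOris pictures (pictures.length + 1) 0).length < pictures.length + 1 := by
    have := pvOris_length_le pictures (pictures.length + 1) 0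
    omega
  rw [pvA_eq pictures (pictures.length + 1) 0 [] hlen, pvB_eq]
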